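-- pv_equiv track=rewrite | github.com/abhikcshil/SpotiSync | dj_spotify_sync/rules_engine.py | _matches_all
-- ===== SOURCE A (Python) =====
-- from typing import Dict, Iterable, Optional
--
-- def _norm(value: object) -> str:
--     return str(value or "").strip().lower()
--
-- def _matches_all(track: Dict, condition: Dict) -> bool:
--     for key, expected in condition.items():
--         expected_norm = _norm(expected)
--         if not expected_norm:
--             return False
--
--         if key == "folder":
--             if _norm(track.get("folder_name")) != expected_norm:
--                 return False
--         elif key == "folder_contains":
--             if expected_norm not in _norm(track.get("folder_name")):
--                 return False
--         elif key == "genre_contains":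
--             if expected_norm not in _norm(track.get("genre")):
--                 return False
--         elif key == "artist_contains":
--             if expected_norm not in _norm(track.get("artist")):
--                 return False
--         elif key == "title_contains":
--             if expected_norm not in _norm(track.get("title")):
--                 return False
--         elif key == "filename_contains":
--             if expected_norm not in _norm(track.get("filename")):
--                 return False
--         else:
--             # Unknown condition keys fail safely.
--             return False
--     return True
-- ===== SOURCE B (Python) =====
-- _CONTAINS_FIELDS = ("folder", "genre", "artist", "title", "filename")
--
-- def _norm(value: object) -> str:
--     return str(value or "").strip().lower()
--
-- def _parse_key(key):
--     """Map a condition key to (track_field, is_exact) by parsing the '_contains'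
--     suffix; None for unrecognized keys."""
--     if key == "folder":
--         return ("folder_name", True)
--     if key.endswith("_contains") and key[:-len("_contains")] in _CONTAINS_FIELDS:
--         base = key[:-len("_contains")]
--         return ("folder_name" if base == "folder" else base, False)
--     return None
--
-- def _compile(condition):
--     """Stage 1: turn the condition dict into a list of (field, expected_norm,
--     is_exact) checks; None = some rule is invalid (empty value or unknown key)."""
--     rules = []
--     for key, expected in condition.items():
--         expected_norm = _norm(expected)
--         if not expected_norm:
--             return None
--         parsed = _parse_key(key)
--         if parsed is None:
--             return None
--         rules.append((parsed[0], expected_norm, parsed[1]))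
--     return rules
--
-- def _matches_all(track, condition) -> bool:
--     rules = _compile(condition)
--     if rules is None:
--         return False
--     return all(
--         _norm(track.get(field)) == exp if exact else exp in _norm(track.get(field))
--         for field, exp, exact in rules
--     )
-- ===== Notes on version B (the rewrite author's own statement) =====
-- stated objective: alternative
-- what changed: Replaces A's single loop with a six-way elif chain by a compile-then-evaluate pipeline: stage 1 parses each condition key by its '_contains' suffix (no per-key branch chain or table) into a list of (field, expected_norm, is_exact) rules or None, stage 2 evaluates all compiled rules with all().
import Mathlib
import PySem

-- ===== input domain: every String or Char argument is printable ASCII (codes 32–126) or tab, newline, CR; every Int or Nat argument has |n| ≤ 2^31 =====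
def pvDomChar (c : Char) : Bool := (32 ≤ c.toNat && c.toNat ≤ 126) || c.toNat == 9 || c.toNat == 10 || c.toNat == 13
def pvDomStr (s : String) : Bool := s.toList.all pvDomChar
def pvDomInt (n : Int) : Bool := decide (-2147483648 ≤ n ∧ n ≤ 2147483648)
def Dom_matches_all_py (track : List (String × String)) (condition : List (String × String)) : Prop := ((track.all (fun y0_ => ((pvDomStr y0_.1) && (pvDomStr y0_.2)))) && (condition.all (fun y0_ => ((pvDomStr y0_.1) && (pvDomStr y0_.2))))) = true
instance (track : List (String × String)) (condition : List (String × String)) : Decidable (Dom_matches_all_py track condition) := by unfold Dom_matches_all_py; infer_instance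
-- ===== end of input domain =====

-- B replaces A's single loop with a six-way elif chain by two stages: compile the condition
-- into (field, expected_norm, is_exact) rules, parsing '*_contains' keys by their suffix,
-- then evaluate all compiled rules; objective: alternative decomposition, same cost.

-- ===== PORT A =====
-- shared module helper _norm(value) = str(value or "").strip().lower(); for a str-or-None
-- argument `value or ""` is getD "" (an empty string is falsy, so getD "" is exact here too)
def norm_py (v : Option String) : String :=
  PySem.Str.lower (PySem.Str.strip (v.getD ""))

-- the for-loop over condition.items() with its early returns, as structural recursion
def matchesAllLoopA (track : List (String × String)) : List (String × String) → Bool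
  | [] => true
  | (key, expected) :: rest =>
    let expectedNorm := norm_py (some expected)
    if expectedNorm = "" then false
    else if key = "folder" then
      if norm_py ((PySem.Dict.mk track).get? "folder_name") ≠ expectedNorm then false
      else matchesAllLoopA track rest
    else if key = "folder_contains" then
      if ¬ PySem.Str.isIn expectedNorm (norm_py ((PySem.Dict.mk track).get? "folder_name")) then false
      else matchesAllLoopA track rest
    else if key = "genre_contains" then
      if ¬ PySem.Str.isIn expectedNorm (norm_py ((PySem.Dict.mk track).get? "genre")) then false
      else matchesAllLoopA track rest
    else if key = "artist_contains" then
      if ¬ PySem.Str.isIn expectedNorm (norm_py ((PySem.Dict.mk track).get? "artist")) then false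
      else matchesAllLoopA track rest
    else if key = "title_contains" then
      if ¬ PySem.Str.isIn expectedNorm (norm_py ((PySem.Dict.mk track).get? "title")) then false
      else matchesAllLoopA track rest
    else if key = "filename_contains" then
      if ¬ PySem.Str.isIn expectedNorm (norm_py ((PySem.Dict.mk track).get? "filename")) then false
      else matchesAllLoopA track rest
    else false

def matches_all_py (track : List (String × String)) (condition : List (String × String)) : Bool :=
  matchesAllLoopA track condition

-- ===== PORT B =====
-- Source B _parse_key: "folder" is the exact rule; otherwise key.endswith("_contains") with
-- key[:-len("_contains")] among the five known fields gives a contains rule; else None.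
-- key[:-9] is ported by hand as take (length - 9) on the char list (exact: Python's
-- negative-stop slice drops the last 9 characters, empty if the string is shorter).
def parseKeyB (key : String) : Option (String × Bool) :=
  if key = "folder" then some ("folder_name", true)
  else
    let base := String.ofList (key.toList.take (key.toList.length - 9))
    if PySem.Str.endswith key "_contains" &&
       decide (base ∈ (["folder", "genre", "artist", "title", "filename"] : List String)) then
      some ((if base = "folder" then "folder_name" else base), false)
    else none

-- Source B _compile (stage 1): the loop with early None returns, as structural recursion
def compileB : List (String × String) → Option (List (String × String × Bool))
  | [] => some []
  | (key, expected) :: rest =>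
    let expectedNorm := norm_py (some expected)
    if expectedNorm = "" then none
    else
      match parseKeyB key with
      | none => none
      | some parsed =>
        match compileB rest with
        | none => none
        | some rs => some ((parsed.1, expectedNorm, parsed.2) :: rs)

-- stage 2 of Source B: evaluate one compiled rule against the track
def ruleOkB (track : List (String × String)) (r : String × String × Bool) : Bool :=
  if r.2.2 then norm_py ((PySem.Dict.mk track).get? r.1) == r.2.1
  else PySem.Str.isIn r.2.1 (norm_py ((PySem.Dict.mk track).get? r.1))

def matches_all_py_alt (track : List (String × String)) (condition : List (String × String)) : Bool :=
  match compileB condition with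
  | none => false
  | some rules => rules.all (ruleOkB track)

-- ===== PRECONDITION & SPEC =====
def Spec_matches_all_py (track : List (String × String)) (condition : List (String × String)) (out : Bool) : Prop := out = matches_all_py_alt track condition
instance (track : List (String × String)) (condition : List (String × String)) (out : Bool) : Decidable (Spec_matches_all_py track condition out) := by unfold Spec_matches_all_py; infer_instance

-- ===== CLAIM (what is proved, stated in full; the proofs are below) =====
def Claim_equal_matches_all_py : Prop := ∀ (track : List (String × String)) (condition : List (String × String)), Dom_matches_all_py track condition → Spec_matches_all_py track condition (matches_all_py track condition)

-- ===== LEMMAS AND PROOFS =====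

-- the per-item boolean both programs reduce to
def stepOk (track : List (String × String)) (key expected : String) : Bool :=
  if norm_py (some expected) = "" then false
  else
    match parseKeyB key with
    | none => false
    | some parsed => ruleOkB track (parsed.1, norm_py (some expected), parsed.2)

-- B's evaluation of a compiled cons is the head's check && the tail's evaluation
theorem alt_cons (track : List (String × String)) (key expected : String)
    (rest : List (String × String)) :
    matches_all_py_alt track ((key, expected) :: rest)
      = (stepOk track key expected && matches_all_py_alt track rest) := by
  unfold matches_all_py_alt stepOk
  by_cases he : norm_py (some expected) = ""
  · simp [compileB, he]
  · cases hk : parseKeyB key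
    · simp [compileB, he, hk]
    · cases hr : compileB rest <;> simp [compileB, he, hk, hr, Bool.and_comm]

-- for a key that is none of A's six literals, B's suffix parser rejects it too
theorem parse_unknown (key : String)
    (h1 : key ≠ "folder") (h2 : key ≠ "folder_contains") (h3 : key ≠ "genre_contains")
    (h4 : key ≠ "artist_contains") (h5 : key ≠ "title_contains") (h6 : key ≠ "filename_contains") :
    parseKeyB key = none := by
  unfold parseKeyB
  rw [if_neg h1]
  rw [if_neg]
  intro hc
  rw [Bool.and_eq_true] at hc
  obtain ⟨hend, hmem⟩ := hc
  rw [PySem.Str.endswith_eq, PySem.Chars.endswith_iff] at hend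
  obtain ⟨pre, hpre⟩ := hend
  have hlen : key.toList.length = pre.length + 9 := by rw [← hpre]; simp
  have htake : key.toList.take (key.toList.length - 9) = pre := by
    rw [hlen, Nat.add_sub_cancel, ← hpre]
    exact List.take_left' rfl
  rw [htake] at hmem
  simp only [List.mem_cons, List.not_mem_nil, or_false, decide_eq_true_eq] at hmem
  rcases hmem with h | h | h | h | h <;>
  · have hp : (String.ofList pre).toList = pre := String.toList_ofList
    rw [h] at hp
    rw [← hp] at hpre
    first
      | exact h2 (String.toList_inj.mp (hpre.symm.trans (by decide)))
      | exact h3 (String.toList_inj.mp (hpre.symm.trans (by decide)))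
      | exact h4 (String.toList_inj.mp (hpre.symm.trans (by decide)))
      | exact h5 (String.toList_inj.mp (hpre.symm.trans (by decide)))
      | exact h6 (String.toList_inj.mp (hpre.symm.trans (by decide)))

-- A's loop body on a cons is the same per-item check && the loop on the rest
theorem loopA_cons (track : List (String × String)) (key expected : String)
    (rest : List (String × String)) :
    matchesAllLoopA track ((key, expected) :: rest)
      = (stepOk track key expected && matchesAllLoopA track rest) := by
  by_cases he : norm_py (some expected) = ""
  · simp [matchesAllLoopA, stepOk, he]
  · by_cases h1 : key = "folder"
    · subst h1
      cases hb : (norm_py ((PySem.Dict.mk track).get? "folder_name") == norm_py (some expected)) <;>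
        simp [matchesAllLoopA, stepOk, ruleOkB, he, hb,
          show parseKeyB "folder" = some ("folder_name", true) from by decide] <;>
        simp_all
    · by_cases h2 : key = "folder_contains"
      · subst h2
        simp [matchesAllLoopA, stepOk, ruleOkB, he, h1,
          show parseKeyB "folder_contains" = some ("folder_name", false) from by decide]
      · by_cases h3 : key = "genre_contains"
        · subst h3
          simp [matchesAllLoopA, stepOk, ruleOkB, he, h1, h2,
            show parseKeyB "genre_contains" = some ("genre", false) from by decide]
        · by_cases h4 : key = "artist_contains"
          · subst h4
            simp [matchesAllLoopA, stepOk, ruleOkB, he, h1, h2, h3,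
              show parseKeyB "artist_contains" = some ("artist", false) from by decide]
          · by_cases h5 : key = "title_contains"
            · subst h5
              simp [matchesAllLoopA, stepOk, ruleOkB, he, h1, h2, h3, h4,
                show parseKeyB "title_contains" = some ("title", false) from by decide]
            · by_cases h6 : key = "filename_contains"
              · subst h6
                simp [matchesAllLoopA, stepOk, ruleOkB, he, h1, h2, h3, h4, h5,
                  show parseKeyB "filename_contains" = some ("filename", false) from by decide]
              · simp [matchesAllLoopA, stepOk, he, h1, h2, h3, h4, h5, h6,
                  parse_unknown key h1 h2 h3 h4 h5 h6]

theorem loopA_eq_alt (track : List (String × String)) :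
    ∀ condition : List (String × String),
      matchesAllLoopA track condition = matches_all_py_alt track condition
  | [] => rfl
  | (k, v) :: rest => by
    rw [loopA_cons, alt_cons, loopA_eq_alt track rest]

-- ===== VERDICT (by name: the statement is the Claim_ definition above) =====
theorem matches_all_py_spec : Claim_equal_matches_all_py := by
  intro track condition _
  unfold Spec_matches_all_py matches_all_py
  exact loopA_eq_alt track condition
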